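-- pv_equiv track=rewrite | github.com/alexaltman/c-h-e-c-k-i-o | ElectronicStation/number-factory/script.py | convert_twosandfours
-- ===== SOURCE A (Python) =====
-- def convert_twosandfours(myl):
--
--     while myl.count(2) >= 3:
--         myl.remove(2)
--         myl.remove(2)
--         myl.remove(2)
--         myl.append(8)
--     while myl.count(3) >= 2:
--         myl.remove(3)
--         myl.remove(3)
--         myl.append(9)
--     while myl.count(2) >= 1 and myl.count(3) >= 1:
--         myl.remove(2)
--         myl.remove(3)
--         myl.append(6)
--     while myl.count(2) >= 2:
--         myl.remove(2)
--         myl.remove(2)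
--         myl.append(4)
--     return myl
-- ===== SOURCE B (Python) =====
-- def convert_twosandfours(myl):
--     c2 = myl.count(2)
--     c3 = myl.count(3)
--     k8, r2 = divmod(c2, 3)
--     k9, r3 = divmod(c3, 2)
--     m = min(r2, r3)
--     r2 -= m
--     r3 -= m
--     k4, r2 = divmod(r2, 2)
--     drop2 = c2 - r2
--     drop3 = c3 - r3
--     out = []
--     seen2 = 0
--     seen3 = 0
--     for x in myl:
--         if x == 2:
--             seen2 += 1
--             if seen2 > drop2:
--                 out.append(x)
--         elif x == 3:
--             seen3 += 1
--             if seen3 > drop3: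
--                 out.append(x)
--         else:
--             out.append(x)
--     out += [8] * k8 + [9] * k9 + [6] * m + [4] * k4
--     return out
-- ===== Notes on version B (the rewrite author's own statement) =====
-- stated objective: alternative
-- what changed: B counts 2s and 3s once, computes the numbers of appended 8s/9s/6s/4s arithmetically (divmod), and builds the result in a single pass that keeps all but the first drop2 2s and drop3 3s, instead of A's repeated count/remove while-loops.
import Mathlib
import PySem

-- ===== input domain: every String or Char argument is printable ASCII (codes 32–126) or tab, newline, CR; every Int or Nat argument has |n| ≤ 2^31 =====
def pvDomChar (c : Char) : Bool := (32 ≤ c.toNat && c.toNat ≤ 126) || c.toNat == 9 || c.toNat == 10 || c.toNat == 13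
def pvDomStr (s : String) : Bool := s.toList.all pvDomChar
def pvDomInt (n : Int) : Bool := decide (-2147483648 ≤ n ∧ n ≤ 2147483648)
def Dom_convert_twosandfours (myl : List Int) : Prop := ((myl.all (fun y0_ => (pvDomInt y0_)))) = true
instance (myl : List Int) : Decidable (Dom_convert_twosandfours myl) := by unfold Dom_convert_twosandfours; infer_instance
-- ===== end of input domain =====

-- B replaces A's repeated count/remove while-loops with counting 2s and 3s once, computing the
-- appended 8/9/6/4 multiplicities arithmetically, and one pass keeping the surviving elements.
-- A mutates myl in place (remove/append) and returns it; B builds a fresh list: the equivalence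
-- proved here is about the RETURN value only.

-- ===== PORT A =====
-- 'myl.remove(v)': under each loop's count guard the element is present, so remove? is some;
-- getD totalizes (when v ∉ l, rmA l v = l, which no reachable call hits).
def rmA (l : List Int) (v : Int) : List Int := (PySem.List.remove? l v).getD l

theorem rmA_eq_erase (l : List Int) (v : Int) : rmA l v = l.erase v := by
  by_cases h : v ∈ l
  · simp [rmA, PySem.List.remove?_eq_some_erase l v h]
  · simp [rmA, (PySem.List.remove?_eq_none_iff l v).mpr h, List.erase_of_not_mem h]

-- while myl.count(2) >= 3: remove 2 thrice; append 8
def loopA1 (l : List Int) : List Int :=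
  if 3 ≤ PySem.List.count l 2 then loopA1 (rmA (rmA (rmA l 2) 2) 2 ++ [8]) else l
termination_by List.count 2 l
decreasing_by
  simp_all [rmA_eq_erase, List.count_append, List.count_erase_self]
  try omega

-- while myl.count(3) >= 2: remove 3 twice; append 9
def loopA2 (l : List Int) : List Int :=
  if 2 ≤ PySem.List.count l 3 then loopA2 (rmA (rmA l 3) 3 ++ [9]) else l
termination_by List.count 3 l
decreasing_by
  simp_all [rmA_eq_erase, List.count_append, List.count_erase_self]
  try omega

-- while myl.count(2) >= 1 and myl.count(3) >= 1: remove 2, remove 3; append 6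
def loopA3 (l : List Int) : List Int :=
  if 1 ≤ PySem.List.count l 2 ∧ 1 ≤ PySem.List.count l 3 then
    loopA3 (rmA (rmA l 2) 3 ++ [6])
  else l
termination_by List.count 2 l
decreasing_by
  simp_all [rmA_eq_erase, List.count_append, List.count_erase_self,
    List.count_erase_of_ne (show (2:Int) ≠ 3 by decide)]
  try omega

-- while myl.count(2) >= 2: remove 2 twice; append 4
def loopA4 (l : List Int) : List Int :=
  if 2 ≤ PySem.List.count l 2 then loopA4 (rmA (rmA l 2) 2 ++ [4]) else l
termination_by List.count 2 l
decreasing_by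
  simp_all [rmA_eq_erase, List.count_append, List.count_erase_self]
  try omega

def convert_twosandfours (myl : List Int) : List Int :=
  loopA4 (loopA3 (loopA2 (loopA1 myl)))

-- ===== PORT B =====
-- the 'for x in myl' pass of Source B: keep every element except the first drop2 2s and first drop3 3s
def altGo (drop2 drop3 : Nat) : List Int → Nat → Nat → List Int
  | [], _, _ => []
  | x :: xs, seen2, seen3 =>
    if x = 2 then
      if seen2 + 1 > drop2 then x :: altGo drop2 drop3 xs (seen2 + 1) seen3
      else altGo drop2 drop3 xs (seen2 + 1) seen3
    else if x = 3 then
      if seen3 + 1 > drop3 then x :: altGo drop2 drop3 xs seen2 (seen3 + 1)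
      else altGo drop2 drop3 xs seen2 (seen3 + 1)
    else x :: altGo drop2 drop3 xs seen2 seen3

def convert_twosandfours_alt (myl : List Int) : List Int :=
  let c2 := PySem.List.count myl 2
  let c3 := PySem.List.count myl 3
  let k8 := c2 / 3
  let r2 := c2 % 3
  let k9 := c3 / 2
  let r3 := c3 % 2
  let m := min r2 r3
  let r2' := r2 - m
  let r3' := r3 - m
  let k4 := r2' / 2
  let r2'' := r2' % 2
  let drop2 := c2 - r2''
  let drop3 := c3 - r3'
  altGo drop2 drop3 myl 0 0
    ++ List.replicate k8 8 ++ List.replicate k9 9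
    ++ List.replicate m 6 ++ List.replicate k4 4

-- ===== PRECONDITION & SPEC =====
def Spec_convert_twosandfours (myl : List Int) (out : List Int) : Prop := out = convert_twosandfours_alt myl
instance (myl : List Int) (out : List Int) : Decidable (Spec_convert_twosandfours myl out) := by unfold Spec_convert_twosandfours; infer_instance

-- ===== CLAIM (what is proved, stated in full; the proofs are below) =====
def Claim_equal_convert_twosandfours : Prop := ∀ (myl : List Int), Dom_convert_twosandfours myl → Spec_convert_twosandfours myl (convert_twosandfours myl)

-- ===== LEMMAS AND PROOFS =====

-- erase the first n occurrences of v
def eraseN (l : List Int) (v : Int) : Nat → List Int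
  | 0 => l
  | n + 1 => eraseN (l.erase v) v n

theorem count_eraseN_self (v : Int) : ∀ (n : Nat) (l : List Int),
    List.count v (eraseN l v n) = List.count v l - n := by
  intro n
  induction n with
  | zero => intro l; simp [eraseN]
  | succ k ih => intro l; simp [eraseN, ih, List.count_erase_self]; omega

theorem count_eraseN_ne (v w : Int) (h : w ≠ v) : ∀ (n : Nat) (l : List Int),
    List.count w (eraseN l v n) = List.count w l := by
  intro n
  induction n with
  | zero => intro l; simp [eraseN]
  | succ k ih => intro l; simp only [eraseN, ih, List.count_erase_of_ne h]

theorem count_rep (v w : Int) (h : w ≠ v) : ∀ (n : Nat),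
    List.count v (List.replicate n w) = 0 := by
  intro n
  induction n with
  | zero => simp
  | succ k ih => simp [List.replicate_succ, ih, h]

theorem eraseN_append (v : Int) : ∀ (n : Nat) (l r : List Int), n ≤ List.count v l →
    eraseN (l ++ r) v n = eraseN l v n ++ r := by
  intro n
  induction n with
  | zero => intro l r _; simp [eraseN]
  | succ k ih =>
    intro l r h
    have hv : v ∈ l := by
      rw [← List.count_pos_iff]; omega
    simp only [eraseN, List.erase_append_left r hv]
    exact ih _ _ (by simp [List.count_erase_self]; omega)

theorem eraseN_eraseN (v : Int) : ∀ (m n : Nat) (l : List Int),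
    eraseN (eraseN l v m) v n = eraseN l v (m + n) := by
  intro m
  induction m with
  | zero => intro n l; simp [eraseN]
  | succ k ih => intro n l; simp only [eraseN, Nat.succ_add]; exact ih n (l.erase v)

theorem erase_eraseN (v w : Int) : ∀ (n : Nat) (l : List Int),
    (eraseN l v n).erase w = eraseN (l.erase w) v n := by
  intro n
  induction n with
  | zero => intro l; simp [eraseN]
  | succ k ih =>
    intro l
    simp only [eraseN]
    rw [ih (l.erase v), List.erase_comm]

theorem eraseN_comm (v w : Int) : ∀ (m : Nat) (l : List Int) (n : Nat),
    eraseN (eraseN l v m) w n = eraseN (eraseN l w n) v m := by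
  intro m
  induction m with
  | zero => intro l n; simp [eraseN]
  | succ k ih =>
    intro l n
    simp only [eraseN]
    rw [ih (l.erase v) n, ← erase_eraseN w v]

theorem eraseN_cons_ne (v x : Int) (hx : x ≠ v) : ∀ (n : Nat) (xs : List Int),
    eraseN (x :: xs) v n = x :: eraseN xs v n := by
  intro n
  induction n with
  | zero => intro xs; simp [eraseN]
  | succ k ih =>
    intro xs
    have he : (x :: xs).erase v = x :: xs.erase v :=
      List.erase_cons_tail (by simp [hx])
    calc eraseN (x :: xs) v (k + 1) = eraseN ((x :: xs).erase v) v k := rfl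
      _ = eraseN (x :: xs.erase v) v k := by rw [he]
      _ = x :: eraseN (xs.erase v) v k := ih _
      _ = x :: eraseN xs v (k + 1) := rfl

theorem eraseN_cons_self (v : Int) (n : Nat) (xs : List Int) :
    eraseN (v :: xs) v (n + 1) = eraseN xs v n := by
  simp [eraseN]

-- closed form of A's first loop
theorem loopA1_eq (l : List Int) :
    loopA1 l = eraseN l 2 (3 * (List.count 2 l / 3)) ++ List.replicate (List.count 2 l / 3) 8 := by
  fun_induction loopA1 l with
  | case1 l h ih =>
    simp only [PySem.List.count_eq] at h
    simp only [rmA_eq_erase] at ih ⊢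
    have hc : List.count 2 ((((l.erase 2).erase 2).erase 2) ++ [8]) = List.count 2 l - 3 := by
      simp [List.count_append, List.count_erase_self]; omega
    rw [ih, hc]
    rw [eraseN_append 2 _ _ [8] (by simp [List.count_erase_self]; omega)]
    have hstep : ∀ k : Nat, eraseN (((l.erase 2).erase 2).erase 2) 2 k = eraseN l 2 (k + 3) := by
      intro k; rfl
    rw [hstep]
    have harith : 3 * ((List.count 2 l - 3) / 3) + 3 = 3 * (List.count 2 l / 3) := by omega
    have harith2 : (List.count 2 l - 3) / 3 + 1 = List.count 2 l / 3 := by omega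
    rw [harith, List.append_assoc, ← harith2]
    simp [List.replicate_succ]
  | case2 l h =>
    simp only [PySem.List.count_eq] at h
    have : List.count 2 l / 3 = 0 := by omega
    simp [this, eraseN]

-- closed form of A's second loop
theorem loopA2_eq (l : List Int) :
    loopA2 l = eraseN l 3 (2 * (List.count 3 l / 2)) ++ List.replicate (List.count 3 l / 2) 9 := by
  fun_induction loopA2 l with
  | case1 l h ih =>
    simp only [PySem.List.count_eq] at h
    simp only [rmA_eq_erase] at ih ⊢
    have hc : List.count 3 (((l.erase 3).erase 3) ++ [9]) = List.count 3 l - 2 := by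
      simp [List.count_append, List.count_erase_self]; omega
    rw [ih, hc]
    rw [eraseN_append 3 _ _ [9] (by simp [List.count_erase_self]; omega)]
    have hstep : ∀ k : Nat, eraseN ((l.erase 3).erase 3) 3 k = eraseN l 3 (k + 2) := by
      intro k; rfl
    rw [hstep]
    have harith : 2 * ((List.count 3 l - 2) / 2) + 2 = 2 * (List.count 3 l / 2) := by omega
    have harith2 : (List.count 3 l - 2) / 2 + 1 = List.count 3 l / 2 := by omega
    rw [harith, List.append_assoc, ← harith2]
    simp [List.replicate_succ]
  | case2 l h =>
    simp only [PySem.List.count_eq] at h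
    have : List.count 3 l / 2 = 0 := by omega
    simp [this, eraseN]

-- closed form of A's third loop (strong induction on the number of 2s)
theorem loopA3_eq_aux : ∀ (fuel : Nat) (l : List Int), List.count 2 l ≤ fuel →
    loopA3 l = eraseN (eraseN l 2 (min (List.count 2 l) (List.count 3 l))) 3
        (min (List.count 2 l) (List.count 3 l))
      ++ List.replicate (min (List.count 2 l) (List.count 3 l)) 6 := by
  intro fuel
  induction fuel with
  | zero =>
    intro l hl
    rw [loopA3]
    have h0 : List.count 2 l = 0 := by omega
    have hng : ¬(1 ≤ PySem.List.count l 2 ∧ 1 ≤ PySem.List.count l 3) := by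
      simp only [PySem.List.count_eq]
      omega
    rw [if_neg hng]
    simp [h0, eraseN]
  | succ f ihf =>
    intro l hl
    rw [loopA3]
    by_cases hg : 1 ≤ PySem.List.count l 2 ∧ 1 ≤ PySem.List.count l 3
    · rw [if_pos hg]
      simp only [PySem.List.count_eq] at hg
      simp only [rmA_eq_erase]
      set c2 := List.count 2 l with hc2
      set c3 := List.count 3 l with hc3
      have hne23 : (2 : Int) ≠ 3 := by decide
      have hne32 : (3 : Int) ≠ 2 := by decide
      have hcount2 : List.count 2 (((l.erase 2).erase 3) ++ [6]) = c2 - 1 := by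
        simp [List.count_append, List.count_erase_of_ne hne23, List.count_erase_self]
        omega
      have hcount3 : List.count 3 (((l.erase 2).erase 3) ++ [6]) = c3 - 1 := by
        simp [List.count_append, List.count_erase_self, List.count_erase_of_ne hne32]
        omega
      rw [ihf _ (by rw [hcount2]; omega), hcount2, hcount3]
      have hm : min (c2 - 1) (c3 - 1) = min c2 c3 - 1 := by omega
      rw [hm]
      set m := min c2 c3 with hmdef
      have hm1 : 1 ≤ m := by omega
      have h2le : m - 1 ≤ List.count 2 ((l.erase 2).erase 3) := by
        simp [List.count_erase_of_ne hne23, List.count_erase_self]; omega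
      rw [eraseN_append 2 _ _ [6] h2le]
      have h3le : m - 1 ≤ List.count 3 (eraseN ((l.erase 2).erase 3) 2 (m - 1)) := by
        rw [count_eraseN_ne 2 3 hne32]
        simp [List.count_erase_self, List.count_erase_of_ne hne32]; omega
      rw [eraseN_append 3 _ _ [6] h3le]
      have hcore : eraseN (eraseN ((l.erase 2).erase 3) 2 (m - 1)) 3 (m - 1)
          = eraseN (eraseN l 2 m) 3 m := by
        rw [← erase_eraseN 2 3 (m - 1) (l.erase 2)]
        have h1 : eraseN ((eraseN (l.erase 2) 2 (m - 1)).erase 3) 3 (m - 1)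
            = eraseN (eraseN (l.erase 2) 2 (m - 1)) 3 (m - 1 + 1) := rfl
        have h2 : eraseN (l.erase 2) 2 (m - 1) = eraseN l 2 (m - 1 + 1) := rfl
        rw [h1, h2]
        have hm' : m - 1 + 1 = m := by omega
        rw [hm']
      rw [hcore, List.append_assoc]
      have hm' : m - 1 + 1 = m := by omega
      rw [← hm']
      simp [List.replicate_succ]
    · rw [if_neg hg]
      simp only [PySem.List.count_eq] at hg
      have : min (List.count 2 l) (List.count 3 l) = 0 := by omega
      simp [this, eraseN]

theorem loopA3_eq (l : List Int) :
    loopA3 l = eraseN (eraseN l 2 (min (List.count 2 l) (List.count 3 l))) 3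
        (min (List.count 2 l) (List.count 3 l))
      ++ List.replicate (min (List.count 2 l) (List.count 3 l)) 6 :=
  loopA3_eq_aux (List.count 2 l) l le_rfl

-- closed form of A's fourth loop
theorem loopA4_eq (l : List Int) :
    loopA4 l = eraseN l 2 (2 * (List.count 2 l / 2)) ++ List.replicate (List.count 2 l / 2) 4 := by
  fun_induction loopA4 l with
  | case1 l h ih =>
    simp only [PySem.List.count_eq] at h
    simp only [rmA_eq_erase] at ih ⊢
    have hc : List.count 2 (((l.erase 2).erase 2) ++ [4]) = List.count 2 l - 2 := by
      simp [List.count_append, List.count_erase_self]; omega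
    rw [ih, hc]
    rw [eraseN_append 2 _ _ [4] (by simp [List.count_erase_self]; omega)]
    have hstep : ∀ k : Nat, eraseN ((l.erase 2).erase 2) 2 k = eraseN l 2 (k + 2) := by
      intro k; rfl
    rw [hstep]
    have harith : 2 * ((List.count 2 l - 2) / 2) + 2 = 2 * (List.count 2 l / 2) := by omega
    have harith2 : (List.count 2 l - 2) / 2 + 1 = List.count 2 l / 2 := by omega
    rw [harith, List.append_assoc, ← harith2]
    simp [List.replicate_succ]
  | case2 l h =>
    simp only [PySem.List.count_eq] at h
    have : List.count 2 l / 2 = 0 := by omega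
    simp [this, eraseN]

-- B's pass keeps all but the first (drop2) 2s and first (drop3) 3s
theorem altGo_eq (drop2 drop3 : Nat) : ∀ (l : List Int) (s2 s3 : Nat),
    drop2 - s2 ≤ List.count 2 l → drop3 - s3 ≤ List.count 3 l →
    altGo drop2 drop3 l s2 s3 = eraseN (eraseN l 2 (drop2 - s2)) 3 (drop3 - s3) := by
  intro l
  induction l with
  | nil => intro s2 s3 h2 h3; simp at h2 h3; simp [altGo, h2, h3, eraseN]
  | cons x xs ih =>
    intro s2 s3 h2 h3
    by_cases hx2 : x = 2
    · subst hx2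
      have hcnt2 : List.count 2 ((2:Int) :: xs) = List.count 2 xs + 1 := by simp
      rw [hcnt2] at h2
      have hcnt3 : List.count 3 ((2:Int) :: xs) = List.count 3 xs := by
        simp
      rw [hcnt3] at h3
      by_cases hk : s2 + 1 > drop2
      · have hz : drop2 - s2 = 0 := by omega
        have hz' : drop2 - (s2 + 1) = 0 := by omega
        simp only [altGo, if_pos hk, if_true]
        rw [ih (s2 + 1) s3 (by omega) h3, hz, hz']
        simp only [eraseN]
        rw [eraseN_cons_ne 3 2 (by decide)]
      · have ha : drop2 - s2 = (drop2 - (s2 + 1)) + 1 := by omega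
        simp only [altGo, if_neg hk, if_true]
        rw [ih (s2 + 1) s3 (by omega) h3, ha, eraseN_cons_self]
    · by_cases hx3 : x = 3
      · subst hx3
        have hcnt2 : List.count 2 ((3:Int) :: xs) = List.count 2 xs := by
          simp
        rw [hcnt2] at h2
        have hcnt3 : List.count 3 ((3:Int) :: xs) = List.count 3 xs + 1 := by simp
        rw [hcnt3] at h3
        by_cases hk : s3 + 1 > drop3
        · have hz : drop3 - s3 = 0 := by omega
          have hz' : drop3 - (s3 + 1) = 0 := by omega
          simp only [altGo, if_neg (by decide : ¬ (3:Int) = 2), if_pos hk, if_true]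
          rw [ih s2 (s3 + 1) h2 (by omega), hz, hz']
          simp only [eraseN]
          rw [eraseN_cons_ne 2 3 (by decide)]
        · have ha : drop3 - s3 = (drop3 - (s3 + 1)) + 1 := by omega
          simp only [altGo, if_neg (by decide : ¬ (3:Int) = 2), if_neg hk, if_true]
          rw [ih s2 (s3 + 1) h2 (by omega), ha]
          rw [eraseN_cons_ne 2 3 (by decide), eraseN_cons_self]
      · have hcnt2 : List.count 2 (x :: xs) = List.count 2 xs := by
          simp [hx2]
        rw [hcnt2] at h2
        have hcnt3 : List.count 3 (x :: xs) = List.count 3 xs := by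
          simp [hx3]
        rw [hcnt3] at h3
        simp only [altGo, if_neg hx2, if_neg hx3]
        rw [ih s2 s3 h2 h3]
        rw [eraseN_cons_ne 2 x hx2, eraseN_cons_ne 3 x hx3]

-- ===== VERDICT (by name: the statement is the Claim_ definition above) =====
theorem convert_twosandfours_spec : Claim_equal_convert_twosandfours := by
  intro myl _
  unfold Spec_convert_twosandfours convert_twosandfours convert_twosandfours_alt
  simp only [PySem.List.count_eq]
  set c2 := List.count 2 myl with hc2
  set c3 := List.count 3 myl with hc3
  set k8 := c2 / 3 with hk8
  set k9 := c3 / 2 with hk9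
  set m := min (c2 % 3) (c3 % 2) with hm
  set k4 := (c2 % 3 - m) / 2 with hk4
  set d2 := c2 - (c2 % 3 - m) % 2 with hd2
  set d3 := c3 - (c3 % 2 - m) with hd3
  have hne23 : (2 : Int) ≠ 3 := by decide
  have hne32 : (3 : Int) ≠ 2 := by decide
  have cr28 : ∀ n, List.count 2 (List.replicate n (8:Int)) = 0 := count_rep 2 8 (by decide)
  have cr38 : ∀ n, List.count 3 (List.replicate n (8:Int)) = 0 := count_rep 3 8 (by decide)
  have cr29 : ∀ n, List.count 2 (List.replicate n (9:Int)) = 0 := count_rep 2 9 (by decide)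
  have cr39 : ∀ n, List.count 3 (List.replicate n (9:Int)) = 0 := count_rep 3 9 (by decide)
  have cr26 : ∀ n, List.count 2 (List.replicate n (6:Int)) = 0 := count_rep 2 6 (by decide)
  have cr36 : ∀ n, List.count 3 (List.replicate n (6:Int)) = 0 := count_rep 3 6 (by decide)
  have hmle2 : m ≤ c2 % 3 := Nat.min_le_left _ _
  have hmle3 : m ≤ c3 % 2 := Nat.min_le_right _ _
  have h1 := loopA1_eq myl
  have c1_2 : List.count 2 (loopA1 myl) = c2 % 3 := by
    rw [h1]; simp [List.count_append, count_eraseN_self, cr28]; omega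
  have c1_3 : List.count 3 (loopA1 myl) = c3 := by
    rw [h1]; simp [List.count_append, count_eraseN_ne 2 3 hne32, cr38]; omega
  have h2 := loopA2_eq (loopA1 myl)
  rw [c1_3] at h2
  have e2 : eraseN (loopA1 myl) 3 (2 * k9)
      = eraseN (eraseN myl 2 (3 * k8)) 3 (2 * k9) ++ List.replicate k8 8 := by
    rw [h1]
    exact eraseN_append 3 _ _ _ (by rw [count_eraseN_ne 2 3 hne32]; omega)
  rw [e2] at h2
  have c2_2 : List.count 2 (loopA2 (loopA1 myl)) = c2 % 3 := by
    rw [h2]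
    simp [List.count_append, count_eraseN_ne 3 2 hne23, count_eraseN_self, cr28, cr29]
    omega
  have c2_3 : List.count 3 (loopA2 (loopA1 myl)) = c3 % 2 := by
    rw [h2]
    simp [List.count_append, count_eraseN_self, count_eraseN_ne 2 3 hne32, cr38, cr39]
    omega
  have h3 := loopA3_eq (loopA2 (loopA1 myl))
  rw [c2_2, c2_3, ← hm] at h3
  have e3a : eraseN (loopA2 (loopA1 myl)) 2 m
      = eraseN (eraseN (eraseN myl 2 (3 * k8)) 3 (2 * k9)) 2 m
        ++ List.replicate k8 8 ++ List.replicate k9 9 := by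
    rw [h2, List.append_assoc]
    rw [eraseN_append 2 _ _ _ (by
      rw [count_eraseN_ne 3 2 hne23, count_eraseN_self]; omega)]
    rw [List.append_assoc]
  have e3core2 : eraseN (eraseN (eraseN myl 2 (3 * k8)) 3 (2 * k9)) 2 m
      = eraseN (eraseN myl 2 (3 * k8 + m)) 3 (2 * k9) := by
    rw [eraseN_comm 3 2, eraseN_eraseN, eraseN_comm 2 3]
  have e3b : eraseN (eraseN (loopA2 (loopA1 myl)) 2 m) 3 m
      = eraseN (eraseN myl 2 (3 * k8 + m)) 3 (2 * k9 + m)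
        ++ List.replicate k8 8 ++ List.replicate k9 9 := by
    rw [e3a, e3core2, List.append_assoc]
    rw [eraseN_append 3 _ _ _ (by
      rw [count_eraseN_self, count_eraseN_ne 2 3 hne32]
      omega)]
    rw [eraseN_eraseN, List.append_assoc]
  rw [e3b] at h3
  have c3_2 : List.count 2 (loopA3 (loopA2 (loopA1 myl))) = c2 % 3 - m := by
    rw [h3]
    simp [List.count_append, count_eraseN_ne 3 2 hne23, count_eraseN_self, cr28, cr29, cr26]
    omega
  have h4 := loopA4_eq (loopA3 (loopA2 (loopA1 myl)))
  rw [c3_2] at h4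
  have e4 : eraseN (loopA3 (loopA2 (loopA1 myl))) 2 (2 * k4)
      = eraseN (eraseN myl 2 (3 * k8 + m + 2 * k4)) 3 (2 * k9 + m)
        ++ List.replicate k8 8 ++ List.replicate k9 9 ++ List.replicate m 6 := by
    rw [h3, List.append_assoc, List.append_assoc]
    rw [eraseN_append 2 _ _ _ (by
      rw [count_eraseN_ne 3 2 hne23, count_eraseN_self]
      omega)]
    rw [eraseN_comm 3 2, eraseN_eraseN, eraseN_comm 2 3]
    simp [List.append_assoc]
  rw [e4] at h4
  have hd2le : d2 ≤ c2 := by omega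
  have hd3le : d3 ≤ c3 := by omega
  have hB := altGo_eq d2 d3 myl 0 0 (by simpa using hd2le) (by simpa using hd3le)
  simp only [Nat.sub_zero] at hB
  rw [hB]
  have hd2eq : d2 = 3 * k8 + m + 2 * k4 := by omega
  have hd3eq : d3 = 2 * k9 + m := by omega
  rw [h4, hd2eq, hd3eq]
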